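-- pv_equiv track=rewrite | github.com/Shr1mpTop/Buffotte | wiki.py | _simple_render
-- ===== SOURCE A (Python) =====
-- def _simple_render(text: str) -> str:
--     """Minimal fallback renderer if markdown library is not installed."""
--     import html as html_module
--
--     lines = text.split("\n")
--     output = []
--     in_code = False
--     code_buf = []
--
--     for line in lines:
--         stripped = line.strip()
--         if stripped.startswith("```"):
--             if in_code:
--                 output.append("<pre><code>" + "\n".join(code_buf) + "</code></pre>")
--                 code_buf = []
--                 in_code = False
--             else:
--                 in_code = True
--             continue
--         if in_code:
--             code_buf.append(html_module.escape(line))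
--             continue
--         if stripped.startswith("# "):
--             output.append(f"<h1>{html_module.escape(stripped[2:])}</h1>")
--         elif stripped.startswith("## "):
--             output.append(f"<h2>{html_module.escape(stripped[3:])}</h2>")
--         elif stripped.startswith("### "):
--             output.append(f"<h3>{html_module.escape(stripped[4:])}</h3>")
--         elif stripped.startswith("---"):
--             output.append("<hr>")
--         elif stripped:
--             output.append(f"<p>{html_module.escape(stripped)}</p>")
--
--     return "\n".join(output)
-- ===== SOURCE B (Python) =====
-- def _simple_render(text: str) -> str:
--     """Two-pass renderer: tokenize into blocks, then render each block."""
--     esc_map = {"&": "&amp;", "<": "&lt;", ">": "&gt;", '"': "&quot;", "'": "&#x27;"}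
--
--     def escape(s):
--         return "".join(esc_map.get(c, c) for c in s)
--
--     lines = iter(text.split("\n"))
--     tokens = []
--     for line in lines:
--         stripped = line.strip()
--         if stripped.startswith("```"):
--             # consume the code block with an inner loop over the same iterator
--             buf = []
--             closed = False
--             for code_line in lines:
--                 if code_line.strip().startswith("```"):
--                     closed = True
--                     break
--                 buf.append(escape(code_line))
--             if closed:
--                 tokens.append(("code", "\n".join(buf)))
--             # an unterminated block exhausts the iterator and is dropped
--         elif stripped.startswith("# "):
--             tokens.append(("h", 1, escape(stripped[2:])))
--         elif stripped.startswith("## "):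
--             tokens.append(("h", 2, escape(stripped[3:])))
--         elif stripped.startswith("### "):
--             tokens.append(("h", 3, escape(stripped[4:])))
--         elif stripped.startswith("---"):
--             tokens.append(("hr",))
--         elif stripped:
--             tokens.append(("p", escape(stripped)))
--
--     def render(tok):
--         kind = tok[0]
--         if kind == "code":
--             return "<pre><code>" + tok[1] + "</code></pre>"
--         if kind == "h":
--             return f"<h{tok[1]}>{tok[2]}</h{tok[1]}>"
--         if kind == "hr":
--             return "<hr>"
--         return f"<p>{tok[1]}</p>"
--
--     return "\n".join(render(t) for t in tokens)
-- ===== Notes on version B (the rewrite author's own statement) =====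
-- stated objective: alternative
-- what changed: Replaces A's single interleaved loop with in_code flag state by a two-pass design: a tokenizer whose inner loop consumes each fenced code block from the line iterator (no boolean mode flag), followed by a separate render pass mapping block tokens to HTML.
import Mathlib
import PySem

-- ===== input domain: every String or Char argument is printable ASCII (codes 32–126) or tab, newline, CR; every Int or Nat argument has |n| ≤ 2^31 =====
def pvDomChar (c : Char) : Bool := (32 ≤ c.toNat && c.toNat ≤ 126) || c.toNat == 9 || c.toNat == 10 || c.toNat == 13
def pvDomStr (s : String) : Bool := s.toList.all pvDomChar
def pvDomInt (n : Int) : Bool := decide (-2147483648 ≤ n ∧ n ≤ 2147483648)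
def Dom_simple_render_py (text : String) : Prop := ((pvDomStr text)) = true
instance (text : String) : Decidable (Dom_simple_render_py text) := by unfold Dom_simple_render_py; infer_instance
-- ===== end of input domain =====

-- B replaces A's single loop with an in_code mode flag by a tokenizer (inner loop consumes each
-- fenced code block) followed by a separate render pass; same output, objective: alternative.

-- html.escape(s) hand-ported: charwise expansion of & < > " ' — exact, since the five
-- sequential str.replace calls of CPython's html.escape never rewrite each other's output.
def pvEscChar (c : Char) : List Char :=
  if c = '&' then "&amp;".toList
  else if c = '<' then "&lt;".toList
  else if c = '>' then "&gt;".toList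
  else if c = '"' then "&quot;".toList
  else if c = '\'' then "&#x27;".toList
  else [c]

def pvEscape (s : List Char) : List Char := s.flatMap pvEscChar

-- ===== PORT A =====
structure PvAState where
  output : List (List Char)
  in_code : Bool
  code_buf : List (List Char)

def simple_render_step (st : PvAState) (line : List Char) : PvAState :=
  let stripped := PySem.Chars.strip line
  if PySem.Chars.startswith stripped "```".toList then
    if st.in_code then
      ⟨st.output ++ ["<pre><code>".toList ++ PySem.Chars.join ['\n'] st.code_buf ++ "</code></pre>".toList],
       false, []⟩
    else ⟨st.output, true, st.code_buf⟩
  else if st.in_code then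
    ⟨st.output, st.in_code, st.code_buf ++ [pvEscape line]⟩
  else if PySem.Chars.startswith stripped "# ".toList then
    ⟨st.output ++ ["<h1>".toList ++ pvEscape (stripped.drop 2) ++ "</h1>".toList], st.in_code, st.code_buf⟩
  else if PySem.Chars.startswith stripped "## ".toList then
    ⟨st.output ++ ["<h2>".toList ++ pvEscape (stripped.drop 3) ++ "</h2>".toList], st.in_code, st.code_buf⟩
  else if PySem.Chars.startswith stripped "### ".toList then
    ⟨st.output ++ ["<h3>".toList ++ pvEscape (stripped.drop 4) ++ "</h3>".toList], st.in_code, st.code_buf⟩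
  else if PySem.Chars.startswith stripped "---".toList then
    ⟨st.output ++ ["<hr>".toList], st.in_code, st.code_buf⟩
  else if stripped ≠ [] then
    ⟨st.output ++ ["<p>".toList ++ pvEscape stripped ++ "</p>".toList], st.in_code, st.code_buf⟩
  else st

def simple_render_py (text : String) : String :=
  String.mk (PySem.Chars.join ['\n']
    ((PySem.Chars.splitOn text.toList ['\n']).foldl simple_render_step ⟨[], false, []⟩).output)

-- ===== PORT B =====
inductive PvTok where
  | code : List Char → PvTok
  | h : Int → List Char → PvTok
  | hr : PvTok
  | p : List Char → PvTok
deriving DecidableEq, Repr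

-- B's inner for-loop over the shared iterator: consume lines up to the closing fence,
-- returning the joined escaped buffer and the remaining lines (none = unterminated).
def pvTakeCode : List (List Char) → List (List Char) → Option (List Char × List (List Char))
  | [], _ => none
  | l :: ls, buf =>
    if PySem.Chars.startswith (PySem.Chars.strip l) "```".toList then
      some (PySem.Chars.join ['\n'] buf, ls)
    else pvTakeCode ls (buf ++ [pvEscape l])

theorem pvTakeCode_length {ls buf t rest} (h : pvTakeCode ls buf = some (t, rest)) :
    rest.length < ls.length := by
  induction ls generalizing buf with
  | nil => simp [pvTakeCode] at h
  | cons l ls ih =>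
    unfold pvTakeCode at h
    split at h
    · cases h; simp
    · exact Nat.lt_trans (ih h) (by simp)

def pvClassify (stripped : List Char) : Option PvTok :=
  if PySem.Chars.startswith stripped "# ".toList then some (.h 1 (pvEscape (stripped.drop 2)))
  else if PySem.Chars.startswith stripped "## ".toList then some (.h 2 (pvEscape (stripped.drop 3)))
  else if PySem.Chars.startswith stripped "### ".toList then some (.h 3 (pvEscape (stripped.drop 4)))
  else if PySem.Chars.startswith stripped "---".toList then some .hr
  else if stripped ≠ [] then some (.p (pvEscape stripped))
  else none

def pvTokenize : List (List Char) → List PvTok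
  | [] => []
  | l :: ls =>
    if PySem.Chars.startswith (PySem.Chars.strip l) "```".toList then
      match h : pvTakeCode ls [] with
      | some (t, rest) => PvTok.code t :: pvTokenize rest
      | none => []
    else
      match pvClassify (PySem.Chars.strip l) with
      | some t => t :: pvTokenize ls
      | none => pvTokenize ls
termination_by ls => ls.length
decreasing_by
  · exact Nat.lt_trans (pvTakeCode_length h) (by simp)
  · simp

def pvRender : PvTok → List Char
  | .code t => "<pre><code>".toList ++ t ++ "</code></pre>".toList
  | .h n s => "<h".toList ++ PySem.Int.toChars n ++ ['>'] ++ s ++ "</h".toList ++ PySem.Int.toChars n ++ ['>']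
  | .hr => "<hr>".toList
  | .p s => "<p>".toList ++ s ++ "</p>".toList

def simple_render_py_alt (text : String) : String :=
  String.mk (PySem.Chars.join ['\n']
    ((pvTokenize (PySem.Chars.splitOn text.toList ['\n'])).map pvRender))

-- ===== PRECONDITION & SPEC =====
def Spec_simple_render_py (text : String) (out : String) : Prop := out = simple_render_py_alt text
instance (text : String) (out : String) : Decidable (Spec_simple_render_py text out) := by unfold Spec_simple_render_py; infer_instance

-- ===== CLAIM (what is proved, stated in full; the proofs are below) =====
def Claim_equal_simple_render_py : Prop := ∀ (text : String), Dom_simple_render_py text → Spec_simple_render_py text (simple_render_py text)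

-- ===== LEMMAS AND PROOFS =====

-- what B produces after an opening fence, as a function of the remaining lines and A's buffer
def pvCodeCont (ls buf : List (List Char)) : List (List Char) :=
  match pvTakeCode ls buf with
  | some (t, rest) => pvRender (.code t) :: (pvTokenize rest).map pvRender
  | none => []

theorem pvToChars_small :
    PySem.Int.toChars 1 = ['1'] ∧ PySem.Int.toChars 2 = ['2'] ∧ PySem.Int.toChars 3 = ['3'] := by
  decide

theorem pvStep_false (out : List (List Char)) (l : List Char) :
    simple_render_step ⟨out, false, []⟩ l =
      if PySem.Chars.startswith (PySem.Chars.strip l) "```".toList then ⟨out, true, []⟩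
      else match pvClassify (PySem.Chars.strip l) with
           | some t => ⟨out ++ [pvRender t], false, []⟩
           | none => ⟨out, false, []⟩ := by
  unfold simple_render_step pvClassify
  split_ifs <;> (try simp_all) <;>
    simp [pvRender, pvToChars_small.1, pvToChars_small.2.1, pvToChars_small.2.2]

theorem pvStep_true (out buf : List (List Char)) (l : List Char) :
    simple_render_step ⟨out, true, buf⟩ l =
      if PySem.Chars.startswith (PySem.Chars.strip l) "```".toList then
        ⟨out ++ ["<pre><code>".toList ++ PySem.Chars.join ['\n'] buf ++ "</code></pre>".toList], false, []⟩
      else ⟨out, true, buf ++ [pvEscape l]⟩ := by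
  unfold simple_render_step
  split_ifs <;> simp_all

theorem pvMain (n : Nat) : ∀ (ls : List (List Char)), ls.length ≤ n →
    (∀ out, (ls.foldl simple_render_step ⟨out, false, []⟩).output = out ++ (pvTokenize ls).map pvRender)
    ∧ (∀ out buf, (ls.foldl simple_render_step ⟨out, true, buf⟩).output = out ++ pvCodeCont ls buf) := by
  induction n with
  | zero =>
    intro ls hls
    have h0 : ls = [] := List.eq_nil_of_length_eq_zero (Nat.le_zero.mp hls)
    subst h0
    exact ⟨fun out => by rw [pvTokenize]; simp,
           fun out buf => by simp [pvCodeCont, pvTakeCode]⟩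
  | succ n ih =>
    intro ls hls
    match ls with
    | [] =>
      exact ⟨fun out => by rw [pvTokenize]; simp,
             fun out buf => by simp [pvCodeCont, pvTakeCode]⟩
    | l :: ls =>
      have hlen : ls.length ≤ n := by simpa using hls
      constructor
      · intro out
        rw [List.foldl_cons]
        by_cases hf : PySem.Chars.startswith (PySem.Chars.strip l) "```".toList = true
        · rw [pvStep_false, if_pos hf, (ih ls hlen).2 out [], pvTokenize, if_pos hf]
          unfold pvCodeCont
          split
          · split <;> simp_all
          · split <;> simp_all
        · rw [pvTokenize, if_neg hf, pvStep_false, if_neg hf]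
          cases hcl : pvClassify (PySem.Chars.strip l) with
          | some t =>
            have hm : (match some t with
                | some t => (⟨out ++ [pvRender t], false, []⟩ : PvAState)
                | none => ⟨out, false, []⟩) = (⟨out ++ [pvRender t], false, []⟩ : PvAState) := rfl
            rw [hm, (ih ls hlen).1]
            simp
          | none =>
            have hm : (match (none : Option PvTok) with
                | some t => (⟨out ++ [pvRender t], false, []⟩ : PvAState)
                | none => ⟨out, false, []⟩) = (⟨out, false, []⟩ : PvAState) := rfl
            rw [hm]
            simpa using (ih ls hlen).1 out
      · intro out buf
        rw [List.foldl_cons]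
        by_cases hf : PySem.Chars.startswith (PySem.Chars.strip l) "```".toList = true
        · have ht : pvTakeCode (l :: ls) buf = some (PySem.Chars.join ['\n'] buf, ls) := by
            unfold pvTakeCode; rw [if_pos hf]
          rw [pvStep_true, if_pos hf, (ih ls hlen).1]
          unfold pvCodeCont
          rw [ht]
          simp [pvRender]
        · have ht : pvTakeCode (l :: ls) buf = pvTakeCode ls (buf ++ [pvEscape l]) := by
            unfold pvTakeCode; rw [if_neg hf, pvTakeCode.eq_def]
          rw [pvStep_true, if_neg hf, (ih ls hlen).2]
          unfold pvCodeCont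
          rw [ht]

-- ===== VERDICT (by name: the statement is the Claim_ definition above) =====
theorem simple_render_py_spec : Claim_equal_simple_render_py := by
  intro text _
  unfold Spec_simple_render_py simple_render_py simple_render_py_alt
  rw [(pvMain (PySem.Chars.splitOn text.toList ['\n']).length
        (PySem.Chars.splitOn text.toList ['\n']) (le_refl _)).1 []]
  simp
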